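-- pv_equiv track=rewrite | github.com/celpegor216/ps | 프로그래머스/unrated/135808. 과일 장수/과일 장수.py | solution
-- ===== SOURCE A (Python) =====
-- def solution(k, m, score):
--     answer = 0
--
--     score.sort(reverse=True)
--
--     length = len(score)
--     for i in range(0, length, m):
--         if i + m <= length:
--             answer += min(score[i:i+m]) * m
--
--     return answer
-- ===== SOURCE B (Python) =====
-- def solution(k, m, score):
--     # Run-length sweep: sort descending in place (same mutation as A), then walk
--     # maximal runs of equal values once; for each run count arithmetically how many
--     # full-box minima (positions p with p < full and (p+1) % m == 0) fall inside it.
--     score.sort(reverse=True)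
--     n = len(score)
--     full = n // m * m
--     answer = 0
--     i = 0
--     while i < n:
--         v = score[i]
--         j = i
--         while j < n and score[j] == v:
--             j += 1
--         answer += v * (min(j, full) // m - min(i, full) // m)
--         i = j
--     return answer * m
-- ===== Notes on version B (the rewrite author's own statement) =====
-- stated objective: alternative
-- what changed: B keeps the in-place descending sort but replaces A's per-box windowing with min() by a single run-length sweep over maximal runs of equal values, counting arithmetically (via floor divisions of the run boundaries) how many full-box minima each distinct value contributes.
-- outside the precondition, e.g. on solution(0, -2, [3, 1, 5]): A returns 0, B returns 12; on solution(0, 0, [1]): A raises ValueError, B raises ZeroDivisionError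
import Mathlib
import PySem

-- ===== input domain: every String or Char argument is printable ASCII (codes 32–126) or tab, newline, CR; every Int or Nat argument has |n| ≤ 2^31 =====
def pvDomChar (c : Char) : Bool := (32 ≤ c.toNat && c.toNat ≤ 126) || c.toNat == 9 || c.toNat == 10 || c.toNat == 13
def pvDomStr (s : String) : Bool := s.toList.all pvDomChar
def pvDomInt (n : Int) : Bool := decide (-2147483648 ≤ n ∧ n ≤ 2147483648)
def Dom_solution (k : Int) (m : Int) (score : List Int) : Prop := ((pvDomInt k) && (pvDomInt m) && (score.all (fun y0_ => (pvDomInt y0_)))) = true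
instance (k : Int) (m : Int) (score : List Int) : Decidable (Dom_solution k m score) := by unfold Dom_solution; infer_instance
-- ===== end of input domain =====

-- B keeps the in-place descending sort (both A and B mutate `score` in place) but replaces A's
-- per-box windowing with min() by a run-length sweep over maximal runs of equal values, counting
-- arithmetically (floor divisions of the run boundaries) how many full-box minima each value
-- contributes (alternative decomposition, same asymptotic cost).

-- ===== PORT A =====
def solution (k : Int) (m : Int) (score : List Int) : Int :=
  let s := PySem.List.sorted score (fun x => x) true
  let length : Int := (s.length : Int)
  (PySem.List.pyRange 0 length m).foldl
    (fun answer i =>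
      if i + m ≤ length then
        answer + ((PySem.List.min? (PySem.List.slice s (some i) (some (i + m))) (fun x => x)).getD 0) * m
      else answer) 0

-- ===== PORT B =====
-- the outer `while i < n` loop of Source B; each step consumes one maximal run of equal values
-- (the inner `while j < n and score[j] == v` loop becomes the takeWhile/dropWhile pair)
def pvSweep (m full : Int) : List Int → Int → Int
  | [], _ => 0
  | v :: t, i =>
      let c : Int := ((t.takeWhile (fun x => x == v)).length : Int) + 1
      v * (PySem.Int.floordiv (min (i + c) full) m - PySem.Int.floordiv (min i full) m)
        + pvSweep m full (t.dropWhile (fun x => x == v)) (i + c)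
  termination_by l _ => l.length
  decreasing_by
    exact Nat.lt_succ_of_le (List.length_dropWhile_le _ _)

def solution_alt (k : Int) (m : Int) (score : List Int) : Int :=
  let s := PySem.List.sorted score (fun x => x) true
  let n : Int := (s.length : Int)
  let full : Int := PySem.Int.floordiv n m * m
  pvSweep m full s 0 * m

-- ===== PRECONDITION & SPEC =====
-- Pre_ excludes m ≤ 0: at m = 0 the Python A raises ValueError (range step 0) and B raises
-- ZeroDivisionError; m < 0 (a negative box size) is outside the task's natural domain — A's
-- returning 0 there is an accident of range() semantics that B's floor divisions do not reproduce.
def Pre_solution (k : Int) (m : Int) (score : List Int) : Prop := 1 ≤ m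
instance (k : Int) (m : Int) (score : List Int) : Decidable (Pre_solution k m score) := by unfold Pre_solution; infer_instance
def pvWitness_solution : Int × Int × List Int := (0, 2, [1, 4, 2, 5, 3])

def Spec_solution (k : Int) (m : Int) (score : List Int) (out : Int) : Prop := out = solution_alt k m score
instance (k : Int) (m : Int) (score : List Int) (out : Int) : Decidable (Spec_solution k m score out) := by unfold Spec_solution; infer_instance

-- ===== CLAIM (what is proved, stated in full; the proofs are below) =====
def Claim_equal_solution : Prop := ∀ (k : Int) (m : Int) (score : List Int), Dom_solution k m score → Pre_solution k m score → Spec_solution k m score (solution k m score)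

-- ===== LEMMAS AND PROOFS =====

lemma pv_getLast_le_of_pairwise : ∀ (l : List Int) (h : l ≠ []),
    l.Pairwise (fun a b => b ≤ a) → ∀ y ∈ l, l.getLast h ≤ y := by
  intro l
  induction l with
  | nil => intro h; exact absurd rfl h
  | cons x t ih =>
    intro _ hp y hy
    rcases List.pairwise_cons.1 hp with ⟨hx, ht⟩
    cases t with
    | nil => simp at hy; simp [hy]
    | cons a u =>
      rw [List.getLast_cons (by simp)]
      rcases List.mem_cons.1 hy with rfl | hy'
      · exact hx _ (List.getLast_mem _)
      · exact ih (by simp) ht y hy'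

lemma pv_minfold_eq_getLast (x : Int) (t : List Int)
    (hp : (x :: t).Pairwise (fun a b => b ≤ a)) :
    t.foldl min x = (x :: t).getLast (by simp) := by
  apply le_antisymm
  · rcases List.mem_cons.1 (List.getLast_mem (l := x :: t) (by simp)) with h | h
    · rw [h]; exact (PySem.List.foldl_min_le t x).1
    · exact (PySem.List.foldl_min_le t x).2 _ h
  · apply pv_getLast_le_of_pairwise (x :: t) (by simp) hp
    rcases PySem.List.foldl_min_mem t x with h | h
    · simp [h]
    · exact List.mem_cons_of_mem _ h

lemma pv_min_eq_getLast (w : List Int) (h : w ≠ [])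
    (hp : w.Pairwise (fun a b => b ≤ a)) :
    (PySem.List.min? w (fun x => x)).getD 0 = w.getLast h := by
  cases w with
  | nil => exact absurd rfl h
  | cons x t => rw [PySem.List.min?_id_cons, Option.getD_some, pv_minfold_eq_getLast x t hp]

lemma pv_window (M k : Nat) (hM : 1 ≤ M) (s : List Int)
    (hs : s.Pairwise (fun a b => b ≤ a)) (hk : k < s.length / M) :
    (PySem.List.min? ((s.drop (M*k)).take M) (fun x => x)).getD 0
      = s.getD (M*k + M - 1) 0 := by
  have hle : (k+1) * M ≤ s.length :=
    (Nat.le_div_iff_mul_le (by omega : 0 < M)).1 (by omega : k + 1 ≤ s.length / M)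
  have hle' : M*k + M ≤ s.length := by nlinarith
  have hwl : ((s.drop (M*k)).take M).length = M := by
    simp [List.length_take, List.length_drop]; omega
  have hidx : M*k + M - 1 < s.length := by omega
  have hpw : ((s.drop (M*k)).take M).Pairwise (fun a b => b ≤ a) :=
    hs.sublist ((List.take_sublist _ _).trans (List.drop_sublist _ _))
  rw [pv_min_eq_getLast _ (by intro hnil; rw [hnil] at hwl; simp at hwl; omega) hpw]
  rw [List.getLast_eq_getElem, List.getD_eq_getElem s 0 hidx]
  rw [List.getElem_take, List.getElem_drop]
  congr 1
  omega

lemma pv_sum_range_ite (f : Nat → Int) (q : Nat) :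
    ∀ (c : Nat), q ≤ c →
    ((List.range c).map (fun k => if k < q then f k else 0)).sum
      = ((List.range q).map f).sum := by
  intro c hqc
  induction c, hqc using Nat.le_induction with
  | base =>
    apply congrArg
    apply List.map_congr_left
    intro k hk
    simp [List.mem_range.1 hk]
  | succ c hqc ih =>
    rw [List.range_succ]
    simp only [List.map_append, List.sum_append]
    rw [ih]
    simp [Nat.not_lt.2 hqc]

-- A's fold in normal form: the sum of the strided minima times m
lemma pv_A_normal (M : Nat) (hM : 1 ≤ M) (s : List Int)
    (hs : s.Pairwise (fun a b => b ≤ a)) :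
    (PySem.List.pyRange 0 ((s.length : Nat) : Int) (M:Int)).foldl
      (fun answer i =>
        if i + (M:Int) ≤ ((s.length : Nat) : Int) then
          answer + ((PySem.List.min? (PySem.List.slice s (some i) (some (i + (M:Int)))) (fun x => x)).getD 0) * (M:Int)
        else answer) 0
      = ((List.range (s.length / M)).map (fun k => s.getD (M*k + M - 1) 0)).sum * (M:Int) := by
  set n := s.length with hn
  set q := n / M with hq
  have hbody : (fun (answer : Int) (i : Int) =>
      if i + (M:Int) ≤ (n : Int) then
        answer + ((PySem.List.min? (PySem.List.slice s (some i) (some (i + (M:Int)))) (fun x => x)).getD 0) * (M:Int)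
      else answer)
    = (fun answer i => answer + (if i + (M:Int) ≤ (n : Int) then
        ((PySem.List.min? (PySem.List.slice s (some i) (some (i + (M:Int)))) (fun x => x)).getD 0) * (M:Int) else 0)) := by
    funext a i; split_ifs <;> simp
  rw [hbody, PySem.List.foldl_add,
      PySem.List.pyRange_of_pos 0 (n:Int) (by exact_mod_cast hM : (0:Int) < (M:Int)),
      List.map_map, zero_add]
  set c : Nat := if (0:Int) < (n:Int) then (((n:Int) - 0 + (M:Int) - 1)/(M:Int)).toNat else 0 with hc
  have hqc : q ≤ c := by
    rcases Nat.eq_zero_or_pos n with h0 | h0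
    · simp [hq, h0]
    · have : c = (n + M - 1) / M := by
        rw [hc, if_pos (by exact_mod_cast h0)]
        have : ((n:Int) - 0 + (M:Int) - 1) = ((n + M - 1 : Nat) : Int) := by omega
        rw [this]
        exact_mod_cast Nat.add_zero ((n + M - 1) / M)
      rw [this, hq]
      exact Nat.div_le_div_right (by omega)
  have hterm : ∀ k ∈ List.range c,
      (if (0 + (M:Int)*(k:Int)) + (M:Int) ≤ (n:Int) then
        ((PySem.List.min? (PySem.List.slice s (some (0 + (M:Int)*(k:Int))) (some ((0 + (M:Int)*(k:Int)) + (M:Int)))) (fun x => x)).getD 0) * (M:Int) else 0)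
      = (if k < q then s.getD (M*k + M - 1) 0 * (M:Int) else 0) := by
    intro k _
    have hguard : ((0 + (M:Int)*(k:Int)) + (M:Int) ≤ (n:Int)) ↔ k < q := by
      rw [hq]
      constructor
      · intro h
        have h' : (k+1) * M ≤ n := by push_cast at h ⊢; nlinarith
        exact Nat.lt_of_lt_of_le (Nat.lt_succ_self k) ((Nat.le_div_iff_mul_le (by omega)).2 h')
      · intro h
        have h' := (Nat.le_div_iff_mul_le (by omega : 0 < M)).1 (by omega : k + 1 ≤ q)
        nlinarith
    by_cases hk : k < q
    · rw [if_pos (hguard.2 hk), if_pos hk]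
      congr 1
      have h0 : (0 + (M:Int)*(k:Int)) = ((M*k : Nat) : Int) := by push_cast; ring
      rw [h0, show ((M*k : Nat) : Int) + (M:Int) = ((M*k : Nat) : Int) + ((M:Nat) : Int) from rfl,
          PySem.List.slice_natCast_add]
      exact pv_window M k hM s hs hk
    · rw [if_neg (fun h => hk (hguard.1 h)), if_neg hk]
  simp only [Function.comp_def]
  rw [List.map_congr_left hterm, pv_sum_range_ite _ _ _ hqc, ← List.sum_map_mul_right]

-- sum over a filtered list as a sum of indicators
lemma pv_sum_filter_map (L : List Nat) (P : Nat → Bool) (g : Nat → Int) :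
    ((L.filter P).map g).sum = (L.map (fun k => if P k then g k else 0)).sum := by
  induction L with
  | nil => rfl
  | cons x t ih =>
    rw [List.filter_cons, List.map_cons, List.sum_cons]
    by_cases h : P x <;> simp [h, ih]

-- splitting the tail-sum at the end of the current run
lemma pv_sum_split (L : List Nat) (f : Nat → Nat) (g : Nat → Int) (i c : Nat) :
    ((L.filter (fun k => decide (i ≤ f k))).map g).sum
      = ((L.filter (fun k => decide (i ≤ f k ∧ f k < i + c))).map g).sum
        + ((L.filter (fun k => decide (i + c ≤ f k))).map g).sum := by
  rw [pv_sum_filter_map, pv_sum_filter_map, pv_sum_filter_map, ← List.sum_map_add]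
  apply congrArg
  apply List.map_congr_left
  intro k _
  split_ifs <;> simp_all <;> omega

lemma pv_sum_const (l : List Nat) (g : Nat → Int) (v : Int)
    (h : ∀ x ∈ l, g x = v) : (l.map g).sum = (l.length : Int) * v := by
  induction l with
  | nil => simp
  | cons x t ih =>
    rw [List.map_cons, List.sum_cons, h x List.mem_cons_self,
      ih (fun y hy => h y (List.mem_cons_of_mem _ hy))]
    simp only [List.length_cons]; push_cast; ring

-- how many full-box minimum positions M*k+M-1 (k < q) lie in the window [i, i+c)
lemma pv_count_window (M : Nat) (hM : 1 ≤ M) (i c : Nat) : ∀ q : Nat,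
    ((List.range q).filter (fun k => decide (i ≤ M*k + M - 1 ∧ M*k + M - 1 < i + c))).length
      = min ((i+c)/M) q - min (i/M) q := by
  intro q
  induction q with
  | zero => simp
  | succ q ih =>
    rw [List.range_succ, List.filter_append, List.length_append, ih]
    have hdivle : i / M ≤ (i+c) / M := Nat.div_le_div_right (by omega)
    have hmul : (q+1)*M = M*q + M := by ring
    have h1 : (i ≤ M*q + M - 1) ↔ i / M ≤ q := by
      constructor
      · intro h
        have : i < (q+1) * M := by omega
        have := (Nat.div_lt_iff_lt_mul (by omega : 0 < M)).2 this
        omega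
      · intro h
        have : i / M < q + 1 := by omega
        have := (Nat.div_lt_iff_lt_mul (by omega : 0 < M)).1 this
        omega
    have h2 : (M*q + M - 1 < i + c) ↔ q + 1 ≤ (i+c) / M := by
      rw [Nat.le_div_iff_mul_le (by omega : 0 < M)]
      omega
    by_cases hin : i ≤ M*q + M - 1 ∧ M*q + M - 1 < i + c
    · have ha := h1.1 hin.1
      have hb := h2.1 hin.2
      simp only [List.filter_cons, List.filter_nil, decide_eq_true_eq, if_pos hin]
      simp only [List.length_cons, List.length_nil]
      omega
    · simp only [List.filter_cons, List.filter_nil, decide_eq_true_eq, if_neg hin]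
      simp only [List.length_nil]
      rw [Decidable.not_and_iff_or_not] at hin
      rcases hin with h | h
      · have := mt h1.2 h; omega
      · have := mt h2.2 h; omega

lemma pv_dropWhile_eq_drop {a : Type} (p : a → Bool) : ∀ l : List a,
    l.dropWhile p = l.drop ((l.takeWhile p).length) := by
  intro l
  induction l with
  | nil => rfl
  | cons x t ih => by_cases h : p x <;> simp [h, ih]

-- the elements of the current run all equal its first element
lemma pv_run_val (s : List Int) (i : Nat) (hi : i < s.length) :
    ∀ j < ((s.drop (i+1)).takeWhile (fun x => x == s[i])).length + 1,
      s.getD (i + j) 0 = s[i] := by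
  intro j hj
  set t := s.drop (i+1) with ht
  cases j with
  | zero => simp [List.getD, List.getElem?_eq_getElem hi]
  | succ j' =>
    have hj' : j' < (t.takeWhile (fun x => x == s[i])).length := by omega
    have hpre : (t.takeWhile (fun x => x == s[i])) <+: t := List.takeWhile_prefix _
    have hjt : j' < t.length := lt_of_lt_of_le hj' (hpre.length_le)
    have hjs : i + (j' + 1) < s.length := by
      rw [ht] at hjt; rw [List.length_drop] at hjt; omega
    have hval : t[j'] = s[i] := by
      have hmem : (t.takeWhile (fun x => x == s[i]))[j']'hj' ∈ t.takeWhile (fun x => x == s[i]) :=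
        List.getElem_mem _
      have := List.mem_takeWhile_imp hmem
      have hgeq : (t.takeWhile (fun x => x == s[i]))[j']'hj' = t[j']'hjt :=
        List.IsPrefix.getElem hpre hj'
      rw [hgeq] at this
      exact eq_of_beq this
    have h2 : t[j']? = s[i + (j' + 1)]? := by
      rw [ht, List.getElem?_drop]
      congr 1
      omega
    simp only [List.getD]
    rw [← h2, List.getElem?_eq_getElem hjt, Option.getD_some, hval]

-- B's sweep, from position i, sums the minima at positions M*k+M-1 ≥ i
lemma pv_sweep_inv (M : Nat) (hM : 1 ≤ M) (s : List Int) :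
    ∀ (d i : Nat), s.length - i ≤ d →
    pvSweep (M:Int) ((s.length / M * M : Nat) : Int) (s.drop i) (i:Int)
      = (((List.range (s.length / M)).filter (fun k => decide (i ≤ M*k + M - 1))).map
          (fun k => s.getD (M*k + M - 1) 0)).sum := by
  intro d
  induction d with
  | zero =>
    intro i hi
    have hni : s.length ≤ i := by omega
    rw [List.drop_eq_nil_of_le hni]
    have : (List.range (s.length / M)).filter (fun k => decide (i ≤ M*k + M - 1)) = [] := by
      apply List.filter_eq_nil_iff.2
      intro k hk
      have hkq := List.mem_range.1 hk
      have : (k+1) * M ≤ s.length :=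
        (Nat.le_div_iff_mul_le (by omega : 0 < M)).1 (by omega : k + 1 ≤ s.length / M)
      have hmul : (k+1)*M = M*k + M := by ring
      simp only [decide_eq_true_eq]
      omega
    rw [this]; simp [pvSweep]
  | succ d ih =>
    intro i hi
    by_cases hin : i < s.length
    case neg =>
      have hni : s.length ≤ i := by omega
      rw [List.drop_eq_nil_of_le hni]
      have : (List.range (s.length / M)).filter (fun k => decide (i ≤ M*k + M - 1)) = [] := by
        apply List.filter_eq_nil_iff.2
        intro k hk
        have hkq := List.mem_range.1 hk
        have : (k+1) * M ≤ s.length :=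
          (Nat.le_div_iff_mul_le (by omega : 0 < M)).1 (by omega : k + 1 ≤ s.length / M)
        have hmul : (k+1)*M = M*k + M := by ring
        simp only [decide_eq_true_eq]
        omega
      rw [this]; simp [pvSweep]
    case pos =>
      set n := s.length with hn
      set q := n / M with hq
      set v := s[i]'hin with hv
      set t := s.drop (i+1) with htdef
      clear_value v t
      have hdrop : s.drop i = v :: t := by
        rw [hv, htdef]; exact List.drop_eq_getElem_cons hin
      set cN : Nat := (t.takeWhile (fun x => x == v)).length + 1 with hcN
      have htlen : t.length = n - (i+1) := by rw [htdef, hn]; exact List.length_drop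
      have hcle : cN ≤ n - i := by
        have := (List.takeWhile_prefix (l := t) (p := fun x => x == v)).length_le
        omega
      have hdropwhile : t.dropWhile (fun x => x == v) = s.drop (i + cN) := by
        rw [pv_dropWhile_eq_drop,
          show (t.takeWhile (fun x => x == v)).length = cN - 1 from by omega,
          htdef, List.drop_drop]
        congr 1
        omega
      -- unfold one step of the sweep
      rw [hdrop, pvSweep]
      have hcast : ((t.takeWhile (fun x => x == v)).length : Int) + 1 = (cN : Int) := by
        rw [hcN]; push_cast; ring
      rw [hcast, hdropwhile]
      have hIH := ih (i + cN) (by omega)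
      rw [show (i:Int) + (cN:Int) = ((i + cN : Nat) : Int) by push_cast; ring, hIH]
      -- split the target sum at i + cN
      rw [pv_sum_split (List.range q) (fun k => M*k + M - 1) _ i cN]
      congr 1
      -- the middle window: all its minima equal v, count them arithmetically
      have hrun : ∀ k ∈ (List.range q).filter (fun k => decide (i ≤ M*k + M - 1 ∧ M*k + M - 1 < i + cN)),
          s.getD (M*k + M - 1) 0 = v := by
        intro k hk
        have hcond := of_decide_eq_true ((List.mem_filter.1 hk).2)
        obtain ⟨j, hji, hjlt⟩ : ∃ j, M*k + M - 1 = i + j ∧ j < cN :=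
          ⟨M*k + M - 1 - i, by omega, by omega⟩
        rw [hji, hv]
        exact pv_run_val s i hin j (by rw [← hv, ← htdef]; omega)
      rw [pv_sum_const _ _ v hrun, pv_count_window M hM i cN q]
      -- B's arithmetic term equals v * (that count)
      have hminc : min (((i + cN : Nat)) : Int) ((q * M : Nat) : Int) = ((min (i + cN) (q*M) : Nat) : Int) := by
        push_cast; omega
      have hmini : min (i:Int) ((q * M : Nat) : Int) = ((min i (q*M) : Nat) : Int) := by
        push_cast; omega
      rw [hminc, hmini, PySem.Int.floordiv_natCast, PySem.Int.floordiv_natCast]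
      have hdivmin : ∀ a : Nat, min a (q*M) / M = min (a / M) q := by
        intro a
        rcases le_total a (q*M) with h | h
        · rw [min_eq_left h, min_eq_left (by
            have := Nat.div_le_div_right (c := M) h
            rwa [Nat.mul_div_cancel q (by omega : 0 < M)] at this)]
        · rw [min_eq_right h, Nat.mul_div_cancel q (by omega : 0 < M),
            min_eq_right (by
              have := Nat.div_le_div_right (c := M) h
              rwa [Nat.mul_div_cancel q (by omega : 0 < M)] at this)]
      rw [hdivmin, hdivmin]
      have hle2 : min (i / M) q ≤ min ((i + cN) / M) q := by
        have := Nat.div_le_div_right (c := M) (by omega : i ≤ i + cN)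
        omega
      push_cast [Nat.cast_sub hle2]
      ring

-- ===== VERDICT (by name: the statement is the Claim_ definition above) =====
theorem solution_spec : Claim_equal_solution := by
  intro k m score _ hpre
  unfold Spec_solution solution solution_alt
  obtain ⟨M, rfl⟩ : ∃ M : Nat, m = (M:Int) := ⟨m.toNat, (Int.toNat_of_nonneg (by exact le_trans (by omega) hpre)).symm⟩
  have hM : 1 ≤ M := by unfold Pre_solution at hpre; exact_mod_cast hpre
  set s := PySem.List.sorted score (fun x => x) true with hsdef
  have hs : s.Pairwise (fun a b => b ≤ a) := PySem.List.sorted_pairwise_rev score (fun x => x)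
  have hfull : PySem.Int.floordiv ((s.length : Nat) : Int) (M:Int) * (M:Int)
      = ((s.length / M * M : Nat) : Int) := by
    rw [PySem.Int.floordiv_natCast]; push_cast; ring
  simp only [hfull]
  rw [pv_A_normal M hM s hs]
  have h0 := pv_sweep_inv M hM s (s.length) 0 (by omega)
  rw [List.drop_zero] at h0
  rw [show ((0:Nat):Int) = (0:Int) from rfl] at h0
  have hfil : (List.range (s.length / M)).filter (fun k => decide ((0:Nat) ≤ M*k + M - 1)) = List.range (s.length / M) :=
    List.filter_eq_self.2 (by intro a ha; simp)
  rw [hfil] at h0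
  rw [h0]
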